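-- pv_equiv track=rewrite | github.com/nishishah01/ai-contract-analyzer | backend/aipolicy_analyzer/contracts/services/analysis_pipeline.py | heuristic_risk
-- ===== SOURCE A (Python) =====
-- RISK_KEYWORDS = {
--     "non-compete": "High",
--     "non compete": "High",
--     "non-compete clause": "High",
--     "penalty": "High",
--     "forfeit": "High",
--     "terminate": "High",
--     "termination": "High",
--     "indemnif": "High",
--     "confidential": "Medium",
--     "privacy": "Medium",
--     "data protection": "Medium",
--     "intellectual property": "Medium",
-- }
--
-- RISK_LEVELS = {"Low": 1, "Medium": 2, "High": 3}
--
-- def heuristic_risk(clause_text: str, llm_risk: str = None) -> str: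
--     """
--     Combine LLM risk (if present) and keyword heuristic to produce final label.
--     """
--     score = RISK_LEVELS.get((llm_risk or "Low").title(), 1)
--     lower = clause_text.lower()
--     for kw, level in RISK_KEYWORDS.items():
--         if kw in lower:
--             score = max(score, RISK_LEVELS[level])
--     # convert back
--     for label, val in RISK_LEVELS.items():
--         if val == score:
--             return label
--     return "Low"
-- ===== SOURCE B (Python) =====
-- HIGH_KEYWORDS = ["non-compete", "non compete", "non-compete clause", "penalty",
--                  "forfeit", "terminate", "termination", "indemnif"]
-- MEDIUM_KEYWORDS = ["confidential", "privacy", "data protection", "intellectual property"]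
-- RISK_LEVELS = {"Low": 1, "Medium": 2, "High": 3}
--
-- def heuristic_risk(clause_text: str, llm_risk: str = None) -> str:
--     lower = clause_text.lower()
--     level = RISK_LEVELS.get((llm_risk or "Low").title(), 1)
--     if level == 3 or any(kw in lower for kw in HIGH_KEYWORDS):
--         return "High"
--     if level >= 2 or any(kw in lower for kw in MEDIUM_KEYWORDS):
--         return "Medium"
--     return "Low"
-- ===== Notes on version B (the rewrite author's own statement) =====
-- stated objective: simpler
-- what changed: Replaces the numeric max-accumulation over a keyword->level dict plus a reverse scan of RISK_LEVELS with a direct priority cascade over per-level keyword lists that returns the label immediately.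
import Mathlib
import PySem

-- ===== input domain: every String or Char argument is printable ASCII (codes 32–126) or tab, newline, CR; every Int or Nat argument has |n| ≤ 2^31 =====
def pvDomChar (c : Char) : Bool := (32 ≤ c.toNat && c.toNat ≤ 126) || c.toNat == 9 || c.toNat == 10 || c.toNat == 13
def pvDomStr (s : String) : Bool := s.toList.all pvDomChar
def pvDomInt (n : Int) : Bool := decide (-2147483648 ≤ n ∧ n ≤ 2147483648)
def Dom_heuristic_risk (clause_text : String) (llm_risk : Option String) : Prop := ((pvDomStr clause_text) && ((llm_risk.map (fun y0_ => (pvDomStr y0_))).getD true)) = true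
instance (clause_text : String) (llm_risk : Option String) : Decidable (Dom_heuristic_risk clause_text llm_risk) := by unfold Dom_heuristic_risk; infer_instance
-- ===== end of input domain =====

-- B replaces A's numeric max-accumulation over a keyword→level dict and the reverse
-- RISK_LEVELS scan with a direct priority cascade over per-level keyword lists.


-- shared helper: Python str.title() (exact on the ASCII domain: a letter is
-- uppercased after a non-letter, lowercased after a letter)
def pyTitleGo : List Char → Bool → List Char
  | [], _ => []
  | c :: rest, prevAlpha =>
    (if PySem.Chars.isalpha c then
        (if prevAlpha then PySem.Chars.lowerChar c else PySem.Chars.upperChar c)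
      else c) :: pyTitleGo rest (PySem.Chars.isalpha c)

def pyTitle (s : String) : String := String.ofList (pyTitleGo s.toList false)

-- shared module constant RISK_LEVELS
def riskLevels : List (String × Int) := [("Low", 1), ("Medium", 2), ("High", 3)]

-- ===== PORT A =====
-- RISK_KEYWORDS, in dict insertion order
def riskKeywords : List (String × String) :=
  [("non-compete", "High"), ("non compete", "High"), ("non-compete clause", "High"),
   ("penalty", "High"), ("forfeit", "High"), ("terminate", "High"),
   ("termination", "High"), ("indemnif", "High"),
   ("confidential", "Medium"), ("privacy", "Medium"),
   ("data protection", "Medium"), ("intellectual property", "Medium")]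

-- the 'for label, val in RISK_LEVELS.items(): if val == score: return label' loop
def recoverLabel : List (String × Int) → Int → String
  | [], _ => "Low"
  | (label, val) :: rest, score => if val == score then label else recoverLabel rest score

def heuristic_risk (clause_text : String) (llm_risk : Option String) : String :=
  let score := (PySem.Dict.mk riskLevels).getD
      (pyTitle (match llm_risk with | none => "Low" | some s => if s = "" then "Low" else s)) 1
  let lower := PySem.Str.lower clause_text
  -- RISK_LEVELS[level]: the key is always present, so get? … getD 1 is exact
  let score := riskKeywords.foldl
      (fun sc kv => if PySem.Str.isIn kv.1 lower then
          max sc (((PySem.Dict.mk riskLevels).get? kv.2).getD 1) else sc) score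
  recoverLabel riskLevels score

-- ===== PORT B =====
def highKeywords : List String :=
  ["non-compete", "non compete", "non-compete clause", "penalty", "forfeit",
   "terminate", "termination", "indemnif"]

def mediumKeywords : List String :=
  ["confidential", "privacy", "data protection", "intellectual property"]

def heuristic_risk_alt (clause_text : String) (llm_risk : Option String) : String :=
  let lower := PySem.Str.lower clause_text
  let level := (PySem.Dict.mk riskLevels).getD
      (pyTitle (match llm_risk with | none => "Low" | some s => if s = "" then "Low" else s)) 1
  if level == 3 || highKeywords.any (fun kw => PySem.Str.isIn kw lower) then "High"
  else if level ≥ 2 || mediumKeywords.any (fun kw => PySem.Str.isIn kw lower) then "Medium"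
  else "Low"

-- ===== PRECONDITION & SPEC =====
def Spec_heuristic_risk (clause_text : String) (llm_risk : Option String) (out : String) : Prop := out = heuristic_risk_alt clause_text llm_risk
instance (clause_text : String) (llm_risk : Option String) (out : String) : Decidable (Spec_heuristic_risk clause_text llm_risk out) := by unfold Spec_heuristic_risk; infer_instance

-- ===== CLAIM (what is proved, stated in full; the proofs are below) =====
def Claim_equal_heuristic_risk : Prop := ∀ (clause_text : String) (llm_risk : Option String), Dom_heuristic_risk clause_text llm_risk → Spec_heuristic_risk clause_text llm_risk (heuristic_risk clause_text llm_risk)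

-- ===== LEMMAS AND PROOFS =====

-- a max-accumulating fold with one value is 'if any matches then max s v else s'
theorem foldl_max_if {α : Type} (p : α → Bool) (v : Int) :
    ∀ (kws : List α) (s : Int),
      kws.foldl (fun sc a => if p a then max sc v else sc) s
        = if kws.any p then max s v else s := by
  intro kws
  induction kws with
  | nil => intro s; simp
  | cons k rest ih =>
    intro s
    simp only [List.foldl_cons, List.any_cons]
    by_cases h : p k = true <;> simp [h, ih]

-- the level the dict assigns to any llm string is 1, 2 or 3
theorem lvl_cases (t : String) :
    (PySem.Dict.mk riskLevels).getD t 1 = 1 ∨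
    (PySem.Dict.mk riskLevels).getD t 1 = 2 ∨
    (PySem.Dict.mk riskLevels).getD t 1 = 3 := by
  simp only [riskLevels, PySem.Dict.getD_eq_get?_getD, PySem.Dict.get?_mk_cons]
  split_ifs <;> simp [PySem.Dict.get?]

theorem foldA_eq (lower : String) (s : Int) :
    riskKeywords.foldl
      (fun sc kv => if PySem.Str.isIn kv.1 lower then
          max sc (((PySem.Dict.mk riskLevels).get? kv.2).getD 1) else sc) s
    = if highKeywords.any (fun kw => PySem.Str.isIn kw lower) then max s 3
      else if mediumKeywords.any (fun kw => PySem.Str.isIn kw lower) then max s 2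
      else s := by
  have hsplit : riskKeywords
      = highKeywords.map (fun kw => (kw, "High"))
        ++ mediumKeywords.map (fun kw => (kw, "Medium")) := by decide
  rw [hsplit, List.foldl_append, List.foldl_map, List.foldl_map]
  have hH : ((PySem.Dict.mk riskLevels).get? "High").getD 1 = 3 := by decide
  have hM : ((PySem.Dict.mk riskLevels).get? "Medium").getD 1 = 2 := by decide
  simp only [hH, hM]
  rw [foldl_max_if (fun kw => PySem.Str.isIn kw lower) 3,
      foldl_max_if (fun kw => PySem.Str.isIn kw lower) 2]
  split_ifs <;> omega

-- ===== VERDICT (by name: the statement is the Claim_ definition above) =====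
theorem heuristic_risk_spec : Claim_equal_heuristic_risk := by
  intro clause_text llm_risk hdom
  clear hdom
  unfold Spec_heuristic_risk heuristic_risk heuristic_risk_alt
  dsimp only
  rw [foldA_eq]
  set lower := PySem.Str.lower clause_text with hlow
  set t := pyTitle (match llm_risk with | none => "Low" | some s => if s = "" then "Low" else s) with ht
  rcases lvl_cases t with h | h | h <;> rw [h] <;>
    rcases hH : highKeywords.any (fun kw => PySem.Str.isIn kw lower) <;>
    rcases hM : mediumKeywords.any (fun kw => PySem.Str.isIn kw lower) <;>
    (try simp only [hH, hM]) <;> decide
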